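-- pv_equiv track=rewrite | github.com/neithaltair/Python_JO | Ejercicios/3generarNumerosPositivos.py | generarNumPares
-- ===== SOURCE A (Python) =====
-- def generarNumPares( n = 100):
--     pares = []
--
--     contador = 0
--     numero = 0
--
--     while contador < n:
--         if numero % 2 == 0:
--             pares.append(numero)
--             contador += 1
--         numero += 1
--
--     return pares
-- ===== SOURCE B (Python) =====
-- def generarNumPares(n=100):
--     return [2 * i for i in range(n)]
-- ===== Notes on version B (the rewrite author's own statement) =====
-- stated objective: faster
-- what changed: Replaces the scan over all integers with a parity test and two separate counters by a direct comprehension computing each even number in closed form over a single range of length n.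
import Mathlib
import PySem

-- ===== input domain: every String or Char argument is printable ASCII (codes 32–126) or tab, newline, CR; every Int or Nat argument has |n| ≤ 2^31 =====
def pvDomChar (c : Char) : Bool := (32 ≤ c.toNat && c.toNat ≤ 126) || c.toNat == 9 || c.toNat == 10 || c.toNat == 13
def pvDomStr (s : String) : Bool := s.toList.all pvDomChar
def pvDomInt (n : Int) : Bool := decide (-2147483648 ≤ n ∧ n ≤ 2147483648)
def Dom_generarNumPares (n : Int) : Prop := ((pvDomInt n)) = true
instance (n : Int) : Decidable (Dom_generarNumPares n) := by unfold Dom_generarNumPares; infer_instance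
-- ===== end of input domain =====

-- B replaces A's scan over all integers (parity test + two counters) by the closed-form
-- comprehension [2*i for i in range(n)]; objective: faster (constant factor).

-- ===== PORT A =====
-- the while loop of A: state (pares, contador, numero)
def generarNumParesLoop (n : Int) (pares : List Int) (contador numero : Int) : List Int :=
  if _h : contador < n then
    if PySem.Int.mod numero 2 = 0 then
      generarNumParesLoop n (pares ++ [numero]) (contador + 1) (numero + 1)
    else
      generarNumParesLoop n pares contador (numero + 1)
  else pares
termination_by (2 * (n - contador) + (if PySem.Int.mod numero 2 = 0 then 0 else 1)).toNat
decreasing_by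
  all_goals
    have hf : ∀ a : ℤ, Int.fmod a 2 = a % 2 := fun a => by
      rw [Int.fmod_eq_emod]; simp
    simp only [PySem.Int.mod, hf] at *
    split <;> omega

def generarNumPares (n : Int) : List Int :=
  generarNumParesLoop n [] 0 0

-- ===== PORT B =====
def generarNumPares_alt (n : Int) : List Int :=
  (PySem.List.pyRange 0 n 1).map (fun i => 2 * i)

-- ===== PRECONDITION & SPEC =====
def Spec_generarNumPares (n : Int) (out : List Int) : Prop := out = generarNumPares_alt n
instance (n : Int) (out : List Int) : Decidable (Spec_generarNumPares n out) := by unfold Spec_generarNumPares; infer_instance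

-- ===== CLAIM (what is proved, stated in full; the proofs are below) =====
def Claim_equal_generarNumPares : Prop := ∀ (n : Int), Dom_generarNumPares n → Spec_generarNumPares n (generarNumPares n)

-- ===== LEMMAS AND PROOFS =====
-- loop invariant: entering the loop with numero = 2*contador (an even number), the loop
-- appends exactly the evens 2*c for c in [contador, n)
theorem generarNumParesLoop_eq (n : Int) :
    ∀ (c : Int) (pares : List Int),
      generarNumParesLoop n pares c (2 * c)
        = pares ++ (PySem.List.pyRange c n 1).map (fun i => 2 * i) := by
  intro c pares
  have hf : ∀ a : ℤ, Int.fmod a 2 = a % 2 := fun a => by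
    rw [Int.fmod_eq_emod]; simp
  by_cases h : c < n
  · have hmod0 : PySem.Int.mod (2 * c) 2 = 0 := by
      simp only [PySem.Int.mod, hf]; omega
    have h1 : PySem.Int.mod (2 * c + 1) 2 ≠ 0 := by
      simp only [PySem.Int.mod, hf]; omega
    rw [generarNumParesLoop, dif_pos h, if_pos hmod0]
    by_cases h2 : c + 1 < n
    · rw [generarNumParesLoop, dif_pos h2, if_neg h1]
      have h3 : 2 * c + 1 + 1 = 2 * (c + 1) := by ring
      rw [h3, generarNumParesLoop_eq n (c + 1) (pares ++ [2 * c]),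
          PySem.List.pyRange_one_cons h]
      simp
    · rw [generarNumParesLoop, dif_neg h2, PySem.List.pyRange_one_cons h,
          PySem.List.pyRange_one_eq_nil (by omega)]
      simp
  · rw [generarNumParesLoop, dif_neg h, PySem.List.pyRange_one_eq_nil (by omega)]
    simp
termination_by c => (n - c).toNat
decreasing_by omega

-- ===== VERDICT (by name: the statement is the Claim_ definition above) =====
theorem generarNumPares_spec : Claim_equal_generarNumPares := by
  intro n _
  unfold Spec_generarNumPares generarNumPares generarNumPares_alt
  have := generarNumParesLoop_eq n 0 []
  simpa using this
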